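-- pv_equiv track=rewrite | github.com/thuyvyng/CS325 | hw3/xyz.py | find
-- ===== SOURCE A (Python) =====
-- def sorted(a):
--     if a == []:
--         return []
--     pivot = a[0]
--     left = [x for x in a if x < pivot]
--     right = [x for x in a[1:] if x>= pivot]
--     return sorted(left) + [pivot] + sorted(right)
--
-- def find(arr):
--     arr = sorted(arr)
--     triples = []
--     n = len(arr)
--
--     for i in range(0, n-2):
--         for j in range(i+1, n-1):
--             for k in range(j+1, n):
--                 if (arr[i] + arr[j] - arr[k] == 0):
--                     triples.append((arr[i],arr[j],arr[k]))
--
--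
--
--     return triples
-- ===== SOURCE B (Python) =====
-- def _bisect_left(a, x):
--     lo = 0
--     hi = len(a)
--     while lo < hi:
--         mid = (lo + hi) // 2
--         if a[mid] < x:
--             lo = mid + 1
--         else:
--             hi = mid
--     return lo
--
-- def _bisect_right(a, x):
--     lo = 0
--     hi = len(a)
--     while lo < hi:
--         mid = (lo + hi) // 2
--         if a[mid] <= x:
--             lo = mid + 1
--         else:
--             hi = mid
--     return lo
--
-- def find(arr):
--     a = sorted(arr)
--     n = len(a)
--     res = []
--     for i in range(0, n - 2):
--         for j in range(i + 1, n - 1):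
--             s = a[i] + a[j]
--             lo = _bisect_left(a, s)
--             hi = _bisect_right(a, s)
--             start = lo if lo > j + 1 else j + 1
--             res.extend([(a[i], a[j], s)] * (hi - start))
--     return res
-- ===== Notes on version B (the rewrite author's own statement) =====
-- stated objective: faster
-- what changed: B replaces A's hand-written quicksort plus cubic triple loop by the builtin sort and, for each pair (i,j), a hand-written binary search locating the contiguous block of sorted values equal to a[i]+a[j], emitting that block's triples at once.
import Mathlib
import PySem

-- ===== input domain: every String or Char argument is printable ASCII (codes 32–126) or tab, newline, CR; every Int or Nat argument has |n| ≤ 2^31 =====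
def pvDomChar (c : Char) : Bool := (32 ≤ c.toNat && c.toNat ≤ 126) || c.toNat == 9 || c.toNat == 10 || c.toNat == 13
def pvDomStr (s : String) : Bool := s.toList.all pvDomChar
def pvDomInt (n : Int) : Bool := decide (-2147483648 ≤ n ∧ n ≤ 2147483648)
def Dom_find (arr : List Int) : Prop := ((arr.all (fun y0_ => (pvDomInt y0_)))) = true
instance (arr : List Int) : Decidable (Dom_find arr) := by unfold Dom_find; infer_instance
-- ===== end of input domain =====

-- B replaces A's cubic scan for the third element by a sort plus a hand-written binary
-- search locating the contiguous block of values equal to a[i]+a[j] (objective: faster).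

-- ===== PORT A =====
-- A's hand-written quicksort: sorted(a) = sorted(left) + [pivot] + sorted(right)
def sortA : List Int → List Int
  | [] => []
  | pivot :: rest =>
      sortA ((pivot :: rest).filter (fun x => decide (x < pivot))) ++ [pivot] ++
        sortA (rest.filter (fun x => decide (pivot ≤ x)))
termination_by a => a.length
decreasing_by
  · simp only [List.filter_cons, decide_eq_true_eq, lt_irrefl, if_false, List.length_cons]
    exact Nat.lt_succ_of_le (List.length_filter_le _ _)
  · simp only [List.length_unattach, List.length_cons]
    exact Nat.lt_succ_of_le ((List.length_filter_le _ rest.attach).trans (List.length_attach).le)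

-- all indices taken inside the loops are in range, so pyGetD is exact here
def find (arr : List Int) : List (List Int) :=
  let a := sortA arr
  let n : Int := a.length
  (PySem.List.pyRange 0 (n - 2)).foldl (fun acc i =>
    (PySem.List.pyRange (i + 1) (n - 1)).foldl (fun acc j =>
      (PySem.List.pyRange (j + 1) n).foldl (fun acc k =>
        if PySem.List.pyGetD a i 0 + PySem.List.pyGetD a j 0 - PySem.List.pyGetD a k 0 = 0
        then acc ++ [[PySem.List.pyGetD a i 0, PySem.List.pyGetD a j 0, PySem.List.pyGetD a k 0]]
        else acc) acc) acc) []

-- ===== PORT B =====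
-- transliteration of Source B's _bisect_left while-loop (lo, hi as Python ints)
def blLoop (a : List Int) (x lo hi : Int) : Int :=
  if _h : lo < hi then
    let mid := PySem.Int.floordiv (lo + hi) 2
    if PySem.List.pyGetD a mid 0 < x then blLoop a x (mid + 1) hi else blLoop a x lo mid
  else lo
termination_by (hi - lo).toNat
decreasing_by
  · have := PySem.Int.floordiv_two_mid_bounds (le_of_lt _h)
    have h2 : PySem.Int.floordiv (lo + hi) 2 < hi :=
      (PySem.Int.floordiv_lt_iff_lt_mul (by norm_num)).mpr (by omega)
    omega
  · have := PySem.Int.floordiv_two_mid_bounds (le_of_lt _h)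
    have h2 : PySem.Int.floordiv (lo + hi) 2 < hi :=
      (PySem.Int.floordiv_lt_iff_lt_mul (by norm_num)).mpr (by omega)
    omega

-- transliteration of Source B's _bisect_right while-loop
def brLoop (a : List Int) (x lo hi : Int) : Int :=
  if _h : lo < hi then
    let mid := PySem.Int.floordiv (lo + hi) 2
    if PySem.List.pyGetD a mid 0 ≤ x then brLoop a x (mid + 1) hi else brLoop a x lo mid
  else lo
termination_by (hi - lo).toNat
decreasing_by
  · have := PySem.Int.floordiv_two_mid_bounds (le_of_lt _h)
    have h2 : PySem.Int.floordiv (lo + hi) 2 < hi :=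
      (PySem.Int.floordiv_lt_iff_lt_mul (by norm_num)).mpr (by omega)
    omega
  · have := PySem.Int.floordiv_two_mid_bounds (le_of_lt _h)
    have h2 : PySem.Int.floordiv (lo + hi) 2 < hi :=
      (PySem.Int.floordiv_lt_iff_lt_mul (by norm_num)).mpr (by omega)
    omega

def find_alt (arr : List Int) : List (List Int) :=
  let a := PySem.List.sorted arr id
  let n : Int := a.length
  (PySem.List.pyRange 0 (n - 2)).foldl (fun acc i =>
    (PySem.List.pyRange (i + 1) (n - 1)).foldl (fun acc j =>
      let s := PySem.List.pyGetD a i 0 + PySem.List.pyGetD a j 0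
      let lo := blLoop a s 0 n
      let hi := brLoop a s 0 n
      let start := if lo > j + 1 then lo else j + 1
      acc ++ List.replicate (hi - start).toNat
        [PySem.List.pyGetD a i 0, PySem.List.pyGetD a j 0, s]) acc) []

-- ===== PRECONDITION & SPEC =====
def Spec_find (arr : List Int) (out : List (List Int)) : Prop := out = find_alt arr
instance (arr : List Int) (out : List (List Int)) : Decidable (Spec_find arr out) := by unfold Spec_find; infer_instance

-- ===== CLAIM (what is proved, stated in full; the proofs are below) =====
def Claim_equal_find : Prop := ∀ (arr : List Int), Dom_find arr → Spec_find arr (find arr)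

-- ===== LEMMAS AND PROOFS =====

theorem sortA_perm : ∀ (a : List Int), (sortA a).Perm a
  | [] => by simp [sortA]
  | pivot :: rest => by
    have ih1 := sortA_perm (rest.filter (fun x => decide (x < pivot)))
    have ih2 := sortA_perm (rest.filter (fun x => decide (pivot ≤ x)))
    rw [sortA]
    have hl : (pivot :: rest).filter (fun x => decide (x < pivot))
        = rest.filter (fun x => decide (x < pivot)) := by
      simp
    rw [hl]
    have hperm : (rest.filter (fun x => decide (x < pivot)) ++
        rest.filter (fun x => decide (pivot ≤ x))).Perm rest := by
      have h := List.filter_append_perm (fun x => decide (x < pivot)) rest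
      have hfun : (fun x : Int => ! decide (x < pivot)) = (fun x : Int => decide (pivot ≤ x)) := by
        funext x; simp [← decide_not, not_lt]
      rwa [hfun] at h
    refine List.Perm.trans ((ih1.append (List.Perm.refl [pivot])).append ih2) ?_
    refine List.Perm.trans ?_ (hperm.cons pivot)
    rw [List.append_assoc]
    exact List.perm_middle
termination_by a => a.length
decreasing_by
  · exact Nat.lt_succ_of_le (List.length_filter_le _ _)
  · exact Nat.lt_succ_of_le (List.length_filter_le _ _)

theorem mem_sortA (a : List Int) (x : Int) : x ∈ sortA a ↔ x ∈ a :=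
  (sortA_perm a).mem_iff

theorem sortA_pairwise : ∀ (a : List Int), (sortA a).Pairwise (· ≤ ·)
  | [] => by simp [sortA]
  | pivot :: rest => by
    have ih1 := sortA_pairwise (rest.filter (fun x => decide (x < pivot)))
    have ih2 := sortA_pairwise (rest.filter (fun x => decide (pivot ≤ x)))
    rw [sortA]
    have hl : (pivot :: rest).filter (fun x => decide (x < pivot))
        = rest.filter (fun x => decide (x < pivot)) := by
      simp
    rw [hl, List.pairwise_append]
    refine ⟨?_, ih2, ?_⟩
    · rw [List.pairwise_append]
      refine ⟨ih1, by simp, ?_⟩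
      intro x hx y hy
      simp only [List.mem_singleton] at hy
      subst hy
      have hx' := (mem_sortA _ x).mp hx
      simp only [List.mem_filter, decide_eq_true_eq] at hx'
      exact le_of_lt hx'.2
    · intro x hx y hy
      have hy' := (mem_sortA _ y).mp hy
      simp only [List.mem_filter, decide_eq_true_eq] at hy'
      rcases List.mem_append.mp hx with hx | hx
      · have hx' := (mem_sortA _ x).mp hx
        simp only [List.mem_filter, decide_eq_true_eq] at hx'
        exact le_trans (le_of_lt hx'.2) hy'.2
      · simp only [List.mem_singleton] at hx
        subst hx
        exact hy'.2
termination_by a => a.length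
decreasing_by
  · exact Nat.lt_succ_of_le (List.length_filter_le _ _)
  · exact Nat.lt_succ_of_le (List.length_filter_le _ _)

theorem sortA_eq_sorted (a : List Int) : sortA a = PySem.List.sorted a id := by
  refine List.Perm.eq_of_pairwise (fun x y _ _ h1 h2 => le_antisymm h1 h2)
    (sortA_pairwise a) (PySem.List.sorted_pairwise a id)
    ((sortA_perm a).trans (PySem.List.sorted_perm a id false).symm)

theorem pyGetD_mono (a : List Int) (hs : a.Pairwise (· ≤ ·)) {i j : Int}
    (h0 : 0 ≤ i) (hij : i ≤ j) (hj : j < (a.length : Int)) :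
    PySem.List.pyGetD a i 0 ≤ PySem.List.pyGetD a j 0 := by
  rcases eq_or_lt_of_le hij with he | hlt
  · rw [he]
  · rw [PySem.List.pyGetD_eq_getElem a 0 h0 (by omega),
      PySem.List.pyGetD_eq_getElem a 0 (by omega) hj]
    exact List.pairwise_iff_getElem.mp hs i.toNat j.toNat (by omega) (by omega) (by omega)

theorem blLoop_spec (a : List Int) (x lo hi : Int)
    (h0 : 0 ≤ lo) (hlh : lo ≤ hi) (hhn : hi ≤ (a.length : Int))
    (hs : a.Pairwise (· ≤ ·)) :
    lo ≤ blLoop a x lo hi ∧ blLoop a x lo hi ≤ hi ∧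
      (∀ k : Int, lo ≤ k → k < blLoop a x lo hi → PySem.List.pyGetD a k 0 < x) ∧
      (∀ k : Int, blLoop a x lo hi ≤ k → k < hi → x ≤ PySem.List.pyGetD a k 0) := by
  rw [blLoop]
  by_cases h1 : lo < hi
  · simp only [dif_pos h1]
    have hb := PySem.Int.floordiv_two_mid_bounds (le_of_lt h1)
    have hmidlt : PySem.Int.floordiv (lo + hi) 2 < hi :=
      (PySem.Int.floordiv_lt_iff_lt_mul (by norm_num)).mpr (by omega)
    set mid := PySem.Int.floordiv (lo + hi) 2 with hmid
    by_cases h2 : PySem.List.pyGetD a mid 0 < x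
    · simp only [if_pos h2]
      obtain ⟨r1, r2, r3, r4⟩ := blLoop_spec a x (mid + 1) hi (by omega) (by omega) hhn hs
      refine ⟨by omega, r2, ?_, r4⟩
      intro k hk1 hk2
      by_cases hk3 : mid + 1 ≤ k
      · exact r3 k hk3 hk2
      · exact lt_of_le_of_lt (pyGetD_mono a hs (by omega) (by omega) (by omega)) h2
    · simp only [if_neg h2]
      obtain ⟨r1, r2, r3, r4⟩ := blLoop_spec a x lo mid h0 (by omega) (by omega) hs
      push Not at h2
      refine ⟨r1, by omega, r3, ?_⟩
      intro k hk1 hk2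
      by_cases hk3 : k < mid
      · exact r4 k hk1 hk3
      · exact le_trans h2 (pyGetD_mono a hs (by omega) (by omega) (by omega))
  · simp only [dif_neg h1]
    exact ⟨le_refl lo, by omega, fun k hk1 hk2 => absurd hk2 (by omega),
      fun k hk1 hk2 => absurd hk2 (by omega)⟩
termination_by (hi - lo).toNat
decreasing_by
  · omega
  · omega

theorem brLoop_spec (a : List Int) (x lo hi : Int)
    (h0 : 0 ≤ lo) (hlh : lo ≤ hi) (hhn : hi ≤ (a.length : Int))
    (hs : a.Pairwise (· ≤ ·)) :
    lo ≤ brLoop a x lo hi ∧ brLoop a x lo hi ≤ hi ∧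
      (∀ k : Int, lo ≤ k → k < brLoop a x lo hi → PySem.List.pyGetD a k 0 ≤ x) ∧
      (∀ k : Int, brLoop a x lo hi ≤ k → k < hi → x < PySem.List.pyGetD a k 0) := by
  rw [brLoop]
  by_cases h1 : lo < hi
  · simp only [dif_pos h1]
    have hb := PySem.Int.floordiv_two_mid_bounds (le_of_lt h1)
    have hmidlt : PySem.Int.floordiv (lo + hi) 2 < hi :=
      (PySem.Int.floordiv_lt_iff_lt_mul (by norm_num)).mpr (by omega)
    set mid := PySem.Int.floordiv (lo + hi) 2 with hmid
    by_cases h2 : PySem.List.pyGetD a mid 0 ≤ x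
    · simp only [if_pos h2]
      obtain ⟨r1, r2, r3, r4⟩ := brLoop_spec a x (mid + 1) hi (by omega) (by omega) hhn hs
      refine ⟨by omega, r2, ?_, r4⟩
      intro k hk1 hk2
      by_cases hk3 : mid + 1 ≤ k
      · exact r3 k hk3 hk2
      · exact le_trans (pyGetD_mono a hs (by omega) (by omega) (by omega)) h2
    · simp only [if_neg h2]
      obtain ⟨r1, r2, r3, r4⟩ := brLoop_spec a x lo mid h0 (by omega) (by omega) hs
      push Not at h2
      refine ⟨r1, by omega, r3, ?_⟩
      intro k hk1 hk2
      by_cases hk3 : k < mid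
      · exact r4 k hk1 hk3
      · exact lt_of_lt_of_le h2 (pyGetD_mono a hs (by omega) (by omega) (by omega))
  · simp only [dif_neg h1]
    exact ⟨le_refl lo, by omega, fun k hk1 hk2 => absurd hk2 (by omega),
      fun k hk1 hk2 => absurd hk2 (by omega)⟩
termination_by (hi - lo).toNat
decreasing_by
  · omega
  · omega

theorem filter_pyRange_interval (A B L H : Int) (p : Int → Bool)
    (hAL : A ≤ L) (hLH : L ≤ H) (hHB : H ≤ B)
    (h : ∀ k : Int, A ≤ k → k < B → (p k = true ↔ (L ≤ k ∧ k < H))) :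
    (PySem.List.pyRange A B).filter p = PySem.List.pyRange L H := by
  rw [PySem.List.pyRange_one_append A L B hAL (le_trans hLH hHB),
    PySem.List.pyRange_one_append L H B hLH hHB, List.filter_append, List.filter_append]
  have h1 : (PySem.List.pyRange A L).filter p = [] := by
    rw [List.filter_eq_nil_iff]
    intro k hk
    rw [PySem.List.mem_pyRange_one] at hk
    simp only [Bool.not_eq_true]
    rcases Bool.eq_false_or_eq_true (p k) with hf | ht
    · exact absurd ((h k hk.1 (by omega)).mp hf) (by omega)
    · exact ht
  have h2 : (PySem.List.pyRange L H).filter p = PySem.List.pyRange L H := by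
    rw [List.filter_eq_self]
    intro k hk
    rw [PySem.List.mem_pyRange_one] at hk
    exact (h k (by omega) (by omega)).mpr ⟨hk.1, hk.2⟩
  have h3 : (PySem.List.pyRange H B).filter p = [] := by
    rw [List.filter_eq_nil_iff]
    intro k hk
    rw [PySem.List.mem_pyRange_one] at hk
    simp only [Bool.not_eq_true]
    rcases Bool.eq_false_or_eq_true (p k) with hf | ht
    · exact absurd ((h k (by omega) hk.2).mp hf) (by omega)
    · exact ht
  rw [h1, h2, h3, List.nil_append, List.append_nil]

theorem inner_eq (a : List Int) (hs : a.Pairwise (· ≤ ·)) (v w jp : Int)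
    (h0 : 0 ≤ jp) (hn : jp ≤ (a.length : Int)) (acc : List (List Int)) :
    (PySem.List.pyRange jp (a.length : Int)).foldl (fun acc k =>
        if v + w - PySem.List.pyGetD a k 0 = 0
        then acc ++ [[v, w, PySem.List.pyGetD a k 0]] else acc) acc
      = acc ++ List.replicate
          ((brLoop a (v + w) 0 (a.length : Int) -
            (if blLoop a (v + w) 0 (a.length : Int) > jp
             then blLoop a (v + w) 0 (a.length : Int) else jp)).toNat)
          [v, w, v + w] := by
  have hbl := blLoop_spec a (v + w) 0 (a.length : Int) (by omega) (by omega) (by omega) hs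
  have hbr := brLoop_spec a (v + w) 0 (a.length : Int) (by omega) (by omega) (by omega) hs
  set bl := blLoop a (v + w) 0 (a.length : Int) with hbl_def
  set br := brLoop a (v + w) 0 (a.length : Int) with hbr_def
  obtain ⟨hbl1, hbl2, hbl3, hbl4⟩ := hbl
  obtain ⟨hbr1, hbr2, hbr3, hbr4⟩ := hbr
  have hblbr : bl ≤ br := by
    by_contra hcon
    push Not at hcon
    have h1 := hbl3 br (by omega) hcon
    have h2 := hbr4 br (le_refl br) (by omega)
    omega
  have hfold : (PySem.List.pyRange jp (a.length : Int)).foldl (fun acc k =>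
        if v + w - PySem.List.pyGetD a k 0 = 0
        then acc ++ [[v, w, PySem.List.pyGetD a k 0]] else acc) acc
      = (PySem.List.pyRange jp (a.length : Int)).foldl (fun acc k =>
        if (fun k => decide (v + w - PySem.List.pyGetD a k 0 = 0)) k = true
        then acc ++ [(fun k => [v, w, PySem.List.pyGetD a k 0]) k] else acc) acc := by
    refine PySem.List.foldl_congr_mem _ _ _ _ ?_
    intro acc k _
    simp
  rw [hfold, PySem.List.foldl_append_if]
  have hLH : max bl jp ≤ max br (max bl jp) := le_max_right _ _
  have hfilter : (PySem.List.pyRange jp (a.length : Int)).filter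
        (fun k => decide (v + w - PySem.List.pyGetD a k 0 = 0))
      = PySem.List.pyRange (max bl jp) (max br (max bl jp)) := by
    refine filter_pyRange_interval jp (a.length : Int) (max bl jp) (max br (max bl jp)) _
      (le_max_right _ _) hLH (by omega) ?_
    intro k hk1 hk2
    simp only [decide_eq_true_eq]
    constructor
    · intro hEq
      have hkv : PySem.List.pyGetD a k 0 = v + w := by omega
      constructor
      · by_contra hcon
        push Not at hcon
        have hklt : k < bl := by omega
        have := hbl3 k (by omega) hklt
        omega
      · by_contra hcon
        push Not at hcon
        have hge : br ≤ k := by omega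
        have := hbr4 k hge (by omega)
        omega
    · rintro ⟨hk3, hk4⟩
      have h1 := hbl4 k (by omega) (by omega)
      have h2 := hbr3 k (by omega) (by omega)
      omega
  rw [hfilter]
  have hmap : (PySem.List.pyRange (max bl jp) (max br (max bl jp))).map
        (fun k => [v, w, PySem.List.pyGetD a k 0])
      = List.replicate ((br - (if bl > jp then bl else jp)).toNat) [v, w, v + w] := by
    have hcongr : ∀ k ∈ PySem.List.pyRange (max bl jp) (max br (max bl jp)),
        [v, w, PySem.List.pyGetD a k 0] = [v, w, v + w] := by
      intro k hk
      rw [PySem.List.mem_pyRange_one] at hk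
      have h1 := hbl4 k (by omega) (by omega)
      have h2 := hbr3 k (by omega) (by omega)
      have hkv : PySem.List.pyGetD a k 0 = v + w := by omega
      rw [hkv]
    rw [List.map_congr_left hcongr]
    rw [List.map_const', PySem.List.length_pyRange_one]
    congr 1
    split_ifs with h <;> omega
  rw [hmap]

-- ===== VERDICT (by name: the statement is the Claim_ definition above) =====
theorem find_spec : Claim_equal_find := by
  unfold Claim_equal_find Spec_find
  intro arr _
  unfold find find_alt
  simp only [sortA_eq_sorted]
  have hsorted : (PySem.List.sorted arr id).Pairwise (· ≤ ·) :=
    PySem.List.sorted_pairwise arr id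
  refine PySem.List.foldl_congr_mem _ _ _ _ ?_
  intro acc i hi
  rw [PySem.List.mem_pyRange_one] at hi
  refine PySem.List.foldl_congr_mem _ _ _ _ ?_
  intro acc2 j hj
  rw [PySem.List.mem_pyRange_one] at hj
  exact inner_eq (PySem.List.sorted arr id) hsorted
    (PySem.List.pyGetD (PySem.List.sorted arr id) i 0)
    (PySem.List.pyGetD (PySem.List.sorted arr id) j 0)
    (j + 1) (by omega) (by omega) acc2
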